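-- pv_equiv track=rewrite | github.com/MrBrantCode/unitest_baseline | mut_generate/mist_train_taco/taco_19245/solution.py | find_possible_book_locations
-- ===== SOURCE A (Python) =====
-- import collections
--
-- class Graph:
--     def __init__(self, n, directed=False):
--         self.node_cnt = n
--         self.__directed = directed
--         self.__adjList = [[] for _ in range(n)]
--
--     def addEdge(self, u, v):
--         self.__adjList[u].append(v)
--         if not self.__directed:
--             self.__adjList[v].append(u)
--
--     def getDistances(self, start, end=None):
--         assert 0 <= start < self.node_cnt
--         dist = [-1] * self.node_cnt
--         q = collections.deque()
--         dist[start] = 0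
--         q.append(start)
--         while q:
--             z = q.popleft()
--             if end == z:
--                 break
--             for t in self.__adjList[z]:
--                 if dist[t] == -1:
--                     dist[t] = dist[z] + 1
--                     q.append(t)
--                     if t == end:
--                         break
--         return dist
--
-- def getAffectedDiameter(graph, affected):
--     affection = [False] * graph.node_cnt
--     for x in affected:
--         affection[x] = True
--     dist0 = graph.getDistances(affected[0])
--     affect_1 = max(range(graph.node_cnt), key=lambda i: dist0[i] if affection[i] else -1)
--     dist1 = graph.getDistances(affect_1)
--     affect_2 = max(range(graph.node_cnt), key=lambda i: dist1[i] if affection[i] else -1)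
--     return affect_1, affect_2
--
-- def find_possible_book_locations(n, m, d, affected, paths):
--     g = Graph(n)
--     for a, b in paths:
--         g.addEdge(a, b)
--     p1, p2 = getAffectedDiameter(g, affected)
--     d1, d2 = g.getDistances(p1), g.getDistances(p2)
--     cnt = sum(1 for i in range(n) if d1[i] <= d and d2[i] <= d)
--     return cnt
-- ===== SOURCE B (Python) =====
-- def find_possible_book_locations(n, m, d, affected, paths):
--     adj = [[] for _ in range(n)]
--     for a, b in paths:
--         adj[a].append(b)
--         adj[b].append(a)
--
--     aff = [False] * n
--     for x in affected:
--         aff[x] = True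
--
--     def distances(src):
--         # round-based dynamic programming (Bellman-style relaxation), no queue:
--         # after k rounds dist[p] is the exact distance from src when it is <= k, else -1
--         dist = [-1] * n
--         dist[src] = 0
--         for k in range(n):
--             dist = [dist[p] if dist[p] != -1
--                     else (k + 1 if any(dist[q] != -1 for q in adj[p]) else -1)
--                     for p in range(n)]
--         return dist
--
--     d0 = distances(affected[0])
--     p1 = max(range(n), key=lambda i: d0[i] if aff[i] else -1)
--     d1 = distances(p1)
--     p2 = max(range(n), key=lambda i: d1[i] if aff[i] else -1)
--     d2 = distances(p2)
--     return sum(1 for x, y in zip(d1, d2) if x <= d and y <= d)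
-- ===== Notes on version B (the rewrite author's own statement) =====
-- stated objective: alternative
-- what changed: Replaced A's queue-based BFS (Graph class, collections.deque, per-node discovery pushes) by a round-based dynamic-programming relaxation: n rounds, each rebuilding the whole distance array with a list comprehension (dist[p] stays if set, else becomes k+1 when any neighbour is already reached); the affected-diameter endpoint selection must be kept verbatim for exact equality on arbitrary (non-tree) inputs, and the final count zips the two distance arrays instead of indexing over range(n).
import Mathlib
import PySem

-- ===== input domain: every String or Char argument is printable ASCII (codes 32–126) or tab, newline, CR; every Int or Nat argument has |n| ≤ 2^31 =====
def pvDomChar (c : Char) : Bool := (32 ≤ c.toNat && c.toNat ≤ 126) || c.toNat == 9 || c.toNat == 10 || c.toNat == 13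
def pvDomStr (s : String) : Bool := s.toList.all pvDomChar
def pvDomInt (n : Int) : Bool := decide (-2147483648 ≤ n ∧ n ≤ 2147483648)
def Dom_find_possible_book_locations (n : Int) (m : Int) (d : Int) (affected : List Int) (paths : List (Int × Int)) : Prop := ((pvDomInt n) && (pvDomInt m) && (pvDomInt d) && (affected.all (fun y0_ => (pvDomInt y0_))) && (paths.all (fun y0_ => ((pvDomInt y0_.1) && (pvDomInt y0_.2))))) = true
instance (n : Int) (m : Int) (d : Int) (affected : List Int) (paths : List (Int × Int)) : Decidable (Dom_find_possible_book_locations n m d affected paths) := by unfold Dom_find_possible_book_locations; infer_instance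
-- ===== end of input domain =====

-- B replaces A's queue-based BFS (deque, per-node discovery, diameter helper class) by a
-- round-based dynamic programming relaxation: n rounds, each recomputing the whole distance
-- array from the previous one by a comprehension (objective: alternative; B does more work
-- per source, no speed claim).

-- Shared vocabulary of the two ports (both Pythons perform these identical single statements):
-- `lst[i].append(v)`, `affection[x] = True` flag building, and the argmax line
-- `max(range(n), key=lambda i: dist[i] if affection[i] else -1)`.
def pvAppendAt (g : List (List Int)) (i : Int) (v : Int) : List (List Int) :=
  PySem.List.pySetD g i (PySem.List.pyGetD g i [] ++ [v])

-- affection = [False]*n; for x in affected: affection[x] = True  (identical line in B)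
def pvAffection (n : Int) (affected : List Int) : List Bool :=
  affected.foldl (fun acc x => PySem.List.pySetD acc x true) (List.replicate n.toNat false)

-- max(range(n), key=lambda i: dist[i] if affection[i] else -1)  (identical line in B;
-- the .getD 0 default is unreachable under Pre_, where n ≥ 1; Python raises on empty range)
def pvArgmaxAff (n : Int) (aff : List Bool) (dist : List Int) : Int :=
  (PySem.List.max? (PySem.List.pyRange 0 n 1)
    (fun i => if PySem.List.pyGetD aff i false then PySem.List.pyGetD dist i (-1) else -1)).getD 0

-- ===== PORT A =====
-- one BFS visit step of A's deque loop;
-- `pyGet? = none` is where Python would raise IndexError (outside Pre_)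
def pvVisit (z : Int) (s : List Int × List Int) (t : Int) : List Int × List Int :=
  match PySem.List.pyGet? s.1 t with
  | some w =>
      if w = -1 then (PySem.List.pySetD s.1 t (PySem.List.pyGetD s.1 z (-1) + 1), s.2 ++ [t])
      else s
  | none => s

-- every entry of a BFS dist array is ≥ -1 (used only for termination of the BFS loop)
def pvOkDist (dist : List Int) : Prop := ∀ v ∈ dist, -1 ≤ v

def pvCountNeg (dist : List Int) : Nat := dist.count (-1)

-- termination facts about the visit step (cited by the port's `decreasing_by`)
lemma pvGetD_ge_neg_one (xs : List Int) (z : Int) (h : pvOkDist xs) :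
    -1 ≤ PySem.List.pyGetD xs z (-1) := by
  simp only [PySem.List.pyGetD]
  cases hg : PySem.List.pyGet? xs z with
  | none => simp
  | some w =>
      simpa using h w (PySem.List.mem_of_pyGet?_eq_some xs hg)

lemma pvSetD_eq_set_of_get {α : Type} (xs : List α) (i : Int) (w v : α)
    (h : PySem.List.pyGet? xs i = some w) :
    ∃ k, ∃ hk : k < xs.length, xs[k] = w ∧ PySem.List.pySetD xs i v = xs.set k v := by
  simp only [PySem.List.pyGet?, PySem.List.pySetD, PySem.List.pySet?] at *
  cases hi : PySem.List.pyIdx? xs.length i with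
  | none => simp [hi] at h
  | some k =>
      simp only [hi, Option.bind_some, Option.map_some, Option.getD_some] at h ⊢
      have hk : k < xs.length := by
        by_contra hk
        simp [List.getElem?_eq_none (by omega : xs.length ≤ k)] at h
      exact ⟨k, hk, by simpa [List.getElem?_eq_getElem hk] using h, rfl⟩

lemma pvMem_pySetD {α : Type} (xs : List α) (i : Int) (v a : α)
    (h : a ∈ PySem.List.pySetD xs i v) : a ∈ xs ∨ a = v := by
  simp only [PySem.List.pySetD, PySem.List.pySet?] at h
  cases hi : PySem.List.pyIdx? xs.length i with
  | none => simp [hi] at h; exact Or.inl h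
  | some k =>
      simp only [hi, Option.map_some, Option.getD_some] at h
      exact List.mem_or_eq_of_mem_set h

lemma pvVisit_spec (z : Int) (s : List Int × List Int) (t : Int) (h : pvOkDist s.1) :
    pvOkDist (pvVisit z s t).1 ∧
    pvCountNeg (pvVisit z s t).1 + (pvVisit z s t).2.length = pvCountNeg s.1 + s.2.length ∧
    (pvVisit z s t).1.length = s.1.length := by
  cases hg : PySem.List.pyGet? s.1 t with
  | none =>
      have hvis : pvVisit z s t = s := by unfold pvVisit; rw [hg]
      rw [hvis]; exact ⟨h, rfl, rfl⟩
  | some w =>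
      by_cases hw : w = -1
      · subst hw
        obtain ⟨k, hk, hkw, hset⟩ :=
          pvSetD_eq_set_of_get s.1 t (-1) (PySem.List.pyGetD s.1 z (-1) + 1) hg
        have hdz := pvGetD_ge_neg_one s.1 z h
        have hvis : pvVisit z s t
            = (s.1.set k (PySem.List.pyGetD s.1 z (-1) + 1), s.2 ++ [t]) := by
          unfold pvVisit; rw [hg]; simp [hset]
        rw [hvis]
        refine ⟨?_, ?_, by simp⟩
        · intro a ha
          rcases List.mem_or_eq_of_mem_set ha with ha | ha
          · exact h a ha
          · omega
        · have hcnt : List.count (-1) (s.1.set k (PySem.List.pyGetD s.1 z (-1) + 1))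
              = (List.count (-1) s.1 - if (s.1[k] == (-1 : Int)) = true then 1 else 0)
                + if ((PySem.List.pyGetD s.1 z (-1) + 1 : Int) == (-1 : Int)) = true then 1 else 0 :=
            List.count_set hk
          have hb1 : (s.1[k] == (-1 : Int)) = true := by simp [hkw]
          have hb2 : ((PySem.List.pyGetD s.1 z (-1) + 1 : Int) == (-1 : Int)) = false := by
            simp; omega
          rw [hb1, hb2] at hcnt
          norm_num at hcnt
          have hpos : 0 < List.count (-1) s.1 :=
            List.count_pos_iff.mpr (hkw ▸ List.getElem_mem hk)
          simp only [pvCountNeg, hcnt, List.length_append, List.length_cons, List.length_nil]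
          omega
      · have hvis : pvVisit z s t = s := by unfold pvVisit; rw [hg]; simp [hw]
        rw [hvis]; exact ⟨h, rfl, rfl⟩

lemma pvVisit_fold_spec (z : Int) (l : List Int) (s : List Int × List Int) (h : pvOkDist s.1) :
    pvOkDist (l.foldl (pvVisit z) s).1 ∧
    pvCountNeg (l.foldl (pvVisit z) s).1 + (l.foldl (pvVisit z) s).2.length
      = pvCountNeg s.1 + s.2.length ∧
    (l.foldl (pvVisit z) s).1.length = s.1.length := by
  induction l generalizing s with
  | nil => exact ⟨h, rfl, rfl⟩
  | cons t l ih =>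
      obtain ⟨h1, h2, h3⟩ := pvVisit_spec z s t h
      obtain ⟨g1, g2, g3⟩ := ih (pvVisit z s t) h1
      simp only [List.foldl_cons]
      exact ⟨g1, by omega, by omega⟩

-- Graph.addEdge (A keeps the class's `directed` flag; it is always False here)
def pvAddEdge (directed : Bool) (g : List (List Int)) (u v : Int) : List (List Int) :=
  let g1 := pvAppendAt g u v
  if directed then g1 else pvAppendAt g1 v u

-- the deque loop of Graph.getDistances: pop left, scan neighbours, append discoveries.
-- (`end` is None at every call site, so `end == z` / `t == end` are identically False and the
-- two dead break-checks are omitted; the proof argument only makes the while-loop total.)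
def pvBfsA (adj : List (List Int)) (dist : List Int) (q : List Int) (h : pvOkDist dist) :
    List Int :=
  match q with
  | [] => dist
  | z :: qt =>
      pvBfsA adj ((PySem.List.pyGetD adj z []).foldl (pvVisit z) (dist, qt)).1
        ((PySem.List.pyGetD adj z []).foldl (pvVisit z) (dist, qt)).2
        (pvVisit_fold_spec z (PySem.List.pyGetD adj z []) (dist, qt) h).1
termination_by pvCountNeg dist + q.length
decreasing_by
  obtain ⟨h1, h2, h3⟩ := pvVisit_fold_spec z (PySem.List.pyGetD adj z []) (dist, qt) h
  dsimp only at h2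
  simp only [List.length_cons]
  omega

lemma pvOkDist_init (k : Nat) (i : Int) :
    pvOkDist (PySem.List.pySetD (List.replicate k (-1)) i 0) := by
  intro a ha
  rcases pvMem_pySetD _ _ _ _ ha with ha | ha
  · simp [List.eq_of_mem_replicate ha]
  · omega

-- Graph.getDistances (the assert raises outside Pre_; the port just computes)
def pvGetDistancesA (n : Int) (adj : List (List Int)) (start : Int) : List Int :=
  pvBfsA adj (PySem.List.pySetD (List.replicate n.toNat (-1)) start 0) [start]
    (pvOkDist_init n.toNat start)

def pvGetAffectedDiameter (n : Int) (adj : List (List Int)) (affected : List Int) :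
    Int × Int :=
  let affection := pvAffection n affected
  let dist0 := pvGetDistancesA n adj (PySem.List.pyGetD affected 0 0)
  let affect1 := pvArgmaxAff n affection dist0
  let dist1 := pvGetDistancesA n adj affect1
  let affect2 := pvArgmaxAff n affection dist1
  (affect1, affect2)

def find_possible_book_locations (n : Int) (m : Int) (d : Int) (affected : List Int)
    (paths : List (Int × Int)) : Int :=
  let g := paths.foldl (fun g p => pvAddEdge false g p.1 p.2) (List.replicate n.toNat [])
  let pp := pvGetAffectedDiameter n g affected
  let d1 := pvGetDistancesA n g pp.1
  let d2 := pvGetDistancesA n g pp.2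
  (PySem.List.pyRange 0 n 1).foldl
    (fun cnt i =>
      if PySem.List.pyGetD d1 i (-1) ≤ d ∧ PySem.List.pyGetD d2 i (-1) ≤ d then cnt + 1
      else cnt) 0

-- ===== PORT B =====
-- one relaxation round of B's `distances`: the whole list comprehension for round k
def pvStepDP (n : Int) (adj : List (List Int)) (dist : List Int) (k : Int) : List Int :=
  (PySem.List.pyRange 0 n 1).map (fun p =>
    if PySem.List.pyGetD dist p (-1) ≠ -1 then PySem.List.pyGetD dist p (-1)
    else if (PySem.List.pyGetD adj p []).any
        (fun q => PySem.List.pyGetD dist q (-1) != -1) then k + 1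
    else -1)

-- B's `distances`: dist = [-1]*n; dist[src] = 0; for k in range(n): dist = [...]
def pvDistDP (n : Int) (adj : List (List Int)) (src : Int) : List Int :=
  (PySem.List.pyRange 0 n 1).foldl (pvStepDP n adj)
    (PySem.List.pySetD (List.replicate n.toNat (-1)) src 0)

def find_possible_book_locations_alt (n : Int) (m : Int) (d : Int) (affected : List Int)
    (paths : List (Int × Int)) : Int :=
  let adj := paths.foldl (fun g p => pvAppendAt (pvAppendAt g p.1 p.2) p.2 p.1)
    (List.replicate n.toNat [])
  let aff := pvAffection n affected
  let d0 := pvDistDP n adj (PySem.List.pyGetD affected 0 0)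
  let p1 := pvArgmaxAff n aff d0
  let d1 := pvDistDP n adj p1
  let p2 := pvArgmaxAff n aff d1
  let d2 := pvDistDP n adj p2
  (d1.zip d2).foldl (fun cnt xy => if xy.1 ≤ d ∧ xy.2 ≤ d then cnt + 1 else cnt) 0

-- ===== PRECONDITION & SPEC =====
-- Pre_ is exactly A's non-raising domain: affected must be non-empty (else IndexError at
-- affected[0]), affected[0] must be ≥ 0 (else the assert in getDistances fails), and every
-- node label used as an index must be a valid Python index, i.e. in [-n, n).
def Pre_find_possible_book_locations (n : Int) (m : Int) (d : Int) (affected : List Int)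
    (paths : List (Int × Int)) : Prop :=
  affected ≠ [] ∧ 0 ≤ affected.headI ∧
  (∀ x ∈ affected, -n ≤ x ∧ x < n) ∧
  (∀ p ∈ paths, (-n ≤ p.1 ∧ p.1 < n) ∧ (-n ≤ p.2 ∧ p.2 < n))

instance (n : Int) (m : Int) (d : Int) (affected : List Int) (paths : List (Int × Int)) :
    Decidable (Pre_find_possible_book_locations n m d affected paths) := by
  unfold Pre_find_possible_book_locations; infer_instance

def pvWitness_find_possible_book_locations : Int × Int × Int × List Int × (List (Int × Int)) :=
  (3, 2, 1, [0, 2], [(0, 1), (1, 2)])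

def Spec_find_possible_book_locations (n : Int) (m : Int) (d : Int) (affected : List Int)
    (paths : List (Int × Int)) (out : Int) : Prop :=
  out = find_possible_book_locations_alt n m d affected paths

instance (n : Int) (m : Int) (d : Int) (affected : List Int) (paths : List (Int × Int))
    (out : Int) : Decidable (Spec_find_possible_book_locations n m d affected paths out) := by
  unfold Spec_find_possible_book_locations; infer_instance

-- ===== CLAIM (what is proved, stated in full; the proofs are below) =====
def Claim_equal_find_possible_book_locations : Prop := ∀ (n : Int) (m : Int) (d : Int) (affected : List Int) (paths : List (Int × Int)), Dom_find_possible_book_locations n m d affected paths → Pre_find_possible_book_locations n m d affected paths → Spec_find_possible_book_locations n m d affected paths (find_possible_book_locations n m d affected paths)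

-- ===== LEMMAS AND PROOFS =====

-- ---- Python indexing on in-range labels, expressed through a position function ----
def pvPos (len : Nat) (i : Int) : Nat := if 0 ≤ i then i.toNat else len - (-i).toNat

def pvInR (n : Int) (i : Int) : Prop := -n ≤ i ∧ i < n

lemma pvIdx?_eq (len : Nat) (i : Int) (h : pvInR (len : Int) i) :
    PySem.List.pyIdx? len i = some (pvPos len i) ∧ pvPos len i < len := by
  obtain ⟨h1, h2⟩ := h
  unfold PySem.List.pyIdx? pvPos
  split_ifs with h0
  · exact ⟨by simp [show i < (len : Int) from h2], by omega⟩
  · refine ⟨by simp [show -(len : Int) ≤ i from h1], by omega⟩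

lemma pvGet?_eq {α : Type} (xs : List α) (i : Int) (d : α) (h : pvInR (xs.length : Int) i) :
    PySem.List.pyGet? xs i = some (xs.getD (pvPos xs.length i) d) := by
  obtain ⟨he, hlt⟩ := pvIdx?_eq xs.length i h
  simp [PySem.List.pyGet?, he, List.getElem?_eq_getElem hlt, List.getD_eq_getElem _ _ hlt]

lemma pvGetD_eq {α : Type} (xs : List α) (i : Int) (d d' : α) (h : pvInR (xs.length : Int) i) :
    PySem.List.pyGetD xs i d = xs.getD (pvPos xs.length i) d' := by
  simp [PySem.List.pyGetD, pvGet?_eq xs i d' h]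

lemma pvSetD_eq {α : Type} (xs : List α) (i : Int) (v : α) (h : pvInR (xs.length : Int) i) :
    PySem.List.pySetD xs i v = xs.set (pvPos xs.length i) v := by
  obtain ⟨he, _⟩ := pvIdx?_eq xs.length i h
  simp [PySem.List.pySetD, PySem.List.pySet?, he]

lemma pvPos_lt (len : Nat) (i : Int) (h : pvInR (len : Int) i) : pvPos len i < len :=
  (pvIdx?_eq len i h).2

-- ---- the adjacency context provided by Pre_ ----
def pvAdjOK (n : Int) (adj : List (List Int)) : Prop :=
  adj.length = n.toNat ∧
  (∀ l ∈ adj, ∀ q ∈ l, pvInR n q) ∧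
  (∀ p q : Nat, p < n.toNat → q < n.toNat →
    ((∃ t ∈ adj.getD p [], pvPos n.toNat t = q) ↔ (∃ t ∈ adj.getD q [], pvPos n.toNat t = p)))

-- ---- the BFS level invariant ----
def pvInv (n : Int) (adj : List (List Int)) (k : Nat) (dist front : List Int) : Prop :=
  dist.length = n.toNat ∧
  (∀ p, p < n.toNat → dist.getD p 0 = -1 ∨ (0 ≤ dist.getD p 0 ∧ dist.getD p 0 ≤ (k : Int))) ∧
  (∀ z ∈ front, pvInR n z ∧ dist.getD (pvPos n.toNat z) 0 = (k : Int)) ∧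
  (∀ p, p < n.toNat → dist.getD p 0 = (k : Int) → ∃ z ∈ front, pvPos n.toNat z = p) ∧
  (∀ p, p < n.toNat → dist.getD p 0 = -1 →
    ∀ q ∈ adj.getD p [], dist.getD (pvPos n.toNat q) 0 = -1 ∨
      dist.getD (pvPos n.toNat q) 0 = (k : Int)) ∧
  (front ≠ [] → ∀ j : Nat, j ≤ k → ∃ p, p < n.toNat ∧ dist.getD p 0 = (j : Int))

-- the level-synchronous reformulation of A's BFS used as a stepping stone of the proof
def pvLevel (adj : List (List Int)) (dist : List Int) (front : List Int) :
    List Int × List Int :=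
  front.foldl (fun s z => (PySem.List.pyGetD adj z []).foldl (pvVisit z) s) (dist, [])

lemma pvOuter_fold_spec (adj : List (List Int)) (front : List Int)
    (s : List Int × List Int) (h : pvOkDist s.1) :
    pvOkDist (front.foldl (fun s z => (PySem.List.pyGetD adj z []).foldl (pvVisit z) s) s).1 ∧
    pvCountNeg (front.foldl (fun s z => (PySem.List.pyGetD adj z []).foldl (pvVisit z) s) s).1 +
      (front.foldl (fun s z => (PySem.List.pyGetD adj z []).foldl (pvVisit z) s) s).2.length
      = pvCountNeg s.1 + s.2.length ∧
    (front.foldl (fun s z => (PySem.List.pyGetD adj z []).foldl (pvVisit z) s) s).1.length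
      = s.1.length := by
  induction front generalizing s with
  | nil => exact ⟨h, rfl, rfl⟩
  | cons z front ih =>
      obtain ⟨h1, h2, h3⟩ := pvVisit_fold_spec z (PySem.List.pyGetD adj z []) s h
      obtain ⟨g1, g2, g3⟩ := ih _ h1
      simp only [List.foldl_cons]
      exact ⟨g1, by omega, by omega⟩

def pvBfsB (adj : List (List Int)) (dist : List Int) (front : List Int) (h : pvOkDist dist) :
    List Int :=
  match front with
  | [] => dist
  | z :: rest =>
      pvBfsB adj (pvLevel adj dist (z :: rest)).1 (pvLevel adj dist (z :: rest)).2
        (pvOuter_fold_spec adj (z :: rest) (dist, []) h).1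
termination_by pvCountNeg dist + front.length
decreasing_by
  obtain ⟨h1, h2, h3⟩ := pvOuter_fold_spec adj (z :: rest) (dist, []) h
  dsimp only at h2
  simp only [pvLevel, List.length_cons, List.length_nil] at *
  omega

-- proof arguments are irrelevant: BFS results only depend on the data arguments
lemma pvBfsA_congr (adj : List (List Int)) {d1 d2 q1 q2 : List Int}
    (hd : d1 = d2) (hq : q1 = q2) (h1 : pvOkDist d1) (h2 : pvOkDist d2) :
    pvBfsA adj d1 q1 h1 = pvBfsA adj d2 q2 h2 := by
  subst hd; subst hq; rfl

-- the second state component is only appended to, and the first does not depend on it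
lemma pvFold_shift {f : (List Int × List Int) → Int → (List Int × List Int)}
    (hf : ∀ d q a, f (d, q) a = ((f (d, []) a).1, q ++ (f (d, []) a).2)) :
    ∀ (l : List Int) (dq : List Int × List Int),
      l.foldl f dq = ((l.foldl f (dq.1, [])).1, dq.2 ++ (l.foldl f (dq.1, [])).2) := by
  intro l
  induction l with
  | nil => intro dq; simp
  | cons a l ih =>
      intro dq
      simp only [List.foldl_cons]
      rw [show f dq = f (dq.1, dq.2) by rfl, hf dq.1 dq.2 a,
        ih ((f (dq.1, []) a).1, dq.2 ++ (f (dq.1, []) a).2), ih (f (dq.1, []) a)]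
      simp [List.append_assoc]

lemma pvVisit_shift (z : Int) : ∀ (d q : List Int) (a : Int),
    pvVisit z (d, q) a = ((pvVisit z (d, []) a).1, q ++ (pvVisit z (d, []) a).2) := by
  intro d q a
  unfold pvVisit
  cases PySem.List.pyGet? d a with
  | none => simp
  | some w => by_cases hw : w = -1 <;> simp [hw]

lemma pvOuterStep_shift (adj : List (List Int)) : ∀ (d q : List Int) (a : Int),
    (fun s z => (PySem.List.pyGetD adj z []).foldl (pvVisit z) s) (d, q) a
      = (((fun s z => (PySem.List.pyGetD adj z []).foldl (pvVisit z) s) (d, []) a).1,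
          q ++ ((fun s z => (PySem.List.pyGetD adj z []).foldl (pvVisit z) s) (d, []) a).2) := by
  intro d q a
  simpa using pvFold_shift (pvVisit_shift a) (PySem.List.pyGetD adj a []) (d, q)

-- processing one whole level of A's deque loop is pvLevel
lemma pvBfsA_level (front : List Int) : ∀ (adj : List (List Int)) (dist q : List Int)
    (h : pvOkDist dist) (h2 : pvOkDist (pvLevel adj dist front).1),
    pvBfsA adj dist (front ++ q) h
      = pvBfsA adj (pvLevel adj dist front).1 (q ++ (pvLevel adj dist front).2) h2 := by
  induction front with
  | nil =>
      intro adj dist q h h2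
      exact pvBfsA_congr adj (by simp [pvLevel]) (by simp [pvLevel]) h h2
  | cons z rest ih =>
      intro adj dist q h h2
      have h1 : pvOkDist ((PySem.List.pyGetD adj z []).foldl (pvVisit z) (dist, [])).1 :=
        (pvVisit_fold_spec z (PySem.List.pyGetD adj z []) (dist, []) h).1
      have hshift := pvFold_shift (pvVisit_shift z) (PySem.List.pyGetD adj z [])
        (dist, rest ++ q)
      have hlev : pvLevel adj dist (z :: rest)
          = ((pvLevel adj ((PySem.List.pyGetD adj z []).foldl (pvVisit z) (dist, [])).1 rest).1,
             ((PySem.List.pyGetD adj z []).foldl (pvVisit z) (dist, [])).2 ++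
               (pvLevel adj ((PySem.List.pyGetD adj z []).foldl (pvVisit z) (dist, [])).1 rest).2) := by
        show (z :: rest).foldl (fun s z => (PySem.List.pyGetD adj z []).foldl (pvVisit z) s)
            (dist, []) = _
        rw [List.foldl_cons]
        rw [pvFold_shift (pvOuterStep_shift adj) rest
          ((PySem.List.pyGetD adj z []).foldl (pvVisit z) (dist, []))]
        rfl
      have hA : pvBfsA adj dist ((z :: rest) ++ q) h
          = pvBfsA adj ((PySem.List.pyGetD adj z []).foldl (pvVisit z) (dist, rest ++ q)).1
              ((PySem.List.pyGetD adj z []).foldl (pvVisit z) (dist, rest ++ q)).2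
              (pvVisit_fold_spec z (PySem.List.pyGetD adj z []) (dist, rest ++ q) h).1 := by
        rw [show ((z :: rest) ++ q) = z :: (rest ++ q) from rfl]
        rw [pvBfsA]
      have hd : ((PySem.List.pyGetD adj z []).foldl (pvVisit z) (dist, rest ++ q)).1
          = ((PySem.List.pyGetD adj z []).foldl (pvVisit z) (dist, [])).1 := by
        rw [hshift]
      have hq2 : ((PySem.List.pyGetD adj z []).foldl (pvVisit z) (dist, rest ++ q)).2
          = rest ++ (q ++ ((PySem.List.pyGetD adj z []).foldl (pvVisit z) (dist, [])).2) := by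
        rw [hshift]; simp [List.append_assoc]
      rw [hA, pvBfsA_congr adj hd hq2
        (pvVisit_fold_spec z (PySem.List.pyGetD adj z []) (dist, rest ++ q) h).1 h1]
      rw [ih adj _ (q ++ ((PySem.List.pyGetD adj z []).foldl (pvVisit z) (dist, [])).2) h1
        ((pvOuter_fold_spec adj rest (((PySem.List.pyGetD adj z []).foldl (pvVisit z) (dist, [])).1, []) h1).1)]
      exact pvBfsA_congr adj (by rw [hlev]) (by rw [hlev]; simp [List.append_assoc]) _ h2

-- A's deque BFS and the level-synchronous BFS compute the same distance array
lemma pvBfsA_eq_pvBfsB : ∀ (N : Nat) (adj : List (List Int)) (dist front : List Int),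
    pvCountNeg dist + front.length ≤ N → ∀ (h h' : pvOkDist dist),
    pvBfsA adj dist front h = pvBfsB adj dist front h' := by
  intro N
  induction N with
  | zero =>
      intro adj dist front hN h h'
      have hfront : front = [] := List.length_eq_zero_iff.mp (by omega)
      subst hfront
      rw [pvBfsA, pvBfsB]
  | succ N ih =>
      intro adj dist front hN h h'
      cases front with
      | nil => rw [pvBfsA, pvBfsB]
      | cons z rest =>
          have hL := pvOuter_fold_spec adj (z :: rest) (dist, []) h
          have h2 : pvOkDist (pvLevel adj dist (z :: rest)).1 := hL.1
          have e1 : pvBfsA adj dist (z :: rest) h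
              = pvBfsA adj (pvLevel adj dist (z :: rest)).1
                  ([] ++ (pvLevel adj dist (z :: rest)).2) h2 := by
            have := pvBfsA_level (z :: rest) adj dist [] h h2
            simpa using this
          have hcnt : pvCountNeg (pvLevel adj dist (z :: rest)).1
              + (pvLevel adj dist (z :: rest)).2.length ≤ N := by
            have h21 := hL.2.1
            dsimp only at h21
            simp only [List.length_cons, List.length_nil] at h21 hN
            show pvCountNeg ((z :: rest).foldl
              (fun s z => (PySem.List.pyGetD adj z []).foldl (pvVisit z) s) (dist, [])).1
              + ((z :: rest).foldl
              (fun s z => (PySem.List.pyGetD adj z []).foldl (pvVisit z) s) (dist, [])).2.length ≤ N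
            omega
          rw [e1, pvBfsB]
          have := ih adj (pvLevel adj dist (z :: rest)).1 (pvLevel adj dist (z :: rest)).2
            hcnt h2 ((pvOuter_fold_spec adj (z :: rest) (dist, []) h).1)
          simpa using this

-- ---- the level step seen as one fold over (source, neighbour-label) pairs ----
lemma pvFoldl_nest_eq_pairs {σ : Type} (g : Int → List Int) (f : Int → σ → Int → σ) :
    ∀ (l : List Int) (s0 : σ),
    l.foldl (fun s z => (g z).foldl (f z) s) s0
      = (l.flatMap (fun z => (g z).map (fun t => (z, t)))).foldl
          (fun s zt => f zt.1 s zt.2) s0 := by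
  intro l
  induction l with
  | nil => intro s0; simp
  | cons z l ih =>
      intro s0
      simp only [List.foldl_cons, List.flatMap_cons, List.foldl_append, List.foldl_map]
      exact ih _

lemma pvStepDP_length (n : Int) (adj : List (List Int)) (dist : List Int) (k : Int) :
    (pvStepDP n adj dist k).length = n.toNat := by
  simp [pvStepDP, PySem.List.length_pyRange_one]

lemma pvGetD_set (l : List Int) (i j : Nat) (v : Int) :
    (l.set i v).getD j 0 = if i = j ∧ i < l.length then v else l.getD j 0 := by
  rw [List.getD_eq_getElem?_getD, List.getElem?_set, List.getD_eq_getElem?_getD]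
  by_cases hij : i = j
  · subst hij
    by_cases hl : i < l.length
    · simp [hl]
    · simp [hl, List.getElem?_eq_none (le_of_not_gt hl)]
  · simp [hij]

lemma pvInR_pos {n q : Int} (h : pvInR n q) : 0 < n ∧ pvInR (n.toNat : Int) q := by
  unfold pvInR at h ⊢; omega

-- the main pair-fold characterisation of one BFS level
lemma pvPairs_fold (n : Int) (k : Nat) (dist0 : List Int) (hlen0 : dist0.length = n.toNat) :
    ∀ (R : List (Int × Int)) (dc out : List Int),
    (∀ zt ∈ R, pvInR n zt.1 ∧ pvInR n zt.2 ∧ dist0.getD (pvPos n.toNat zt.1) 0 = (k : Int)) →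
    dc.length = n.toNat →
    (∀ p, p < n.toNat → dc.getD p 0 =
      (if dist0.getD p 0 ≠ -1 then dist0.getD p 0
       else if ∃ t ∈ out, pvPos n.toNat t = p then (k : Int) + 1 else -1)) →
    (∀ t ∈ out, pvInR n t ∧ dist0.getD (pvPos n.toNat t) 0 = -1) →
    ((R.foldl (fun s zt => pvVisit zt.1 s zt.2) (dc, out)).1.length = n.toNat ∧
     (∀ p, p < n.toNat →
       (R.foldl (fun s zt => pvVisit zt.1 s zt.2) (dc, out)).1.getD p 0 =
        (if dist0.getD p 0 ≠ -1 then dist0.getD p 0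
         else if ∃ t ∈ (R.foldl (fun s zt => pvVisit zt.1 s zt.2) (dc, out)).2,
             pvPos n.toNat t = p then (k : Int) + 1 else -1)) ∧
     (∀ t ∈ (R.foldl (fun s zt => pvVisit zt.1 s zt.2) (dc, out)).2,
        pvInR n t ∧ dist0.getD (pvPos n.toNat t) 0 = -1 ∧
        (t ∈ out ∨ ∃ z, (z, t) ∈ R)) ∧
     (∀ p, p < n.toNat → dist0.getD p 0 = -1 →
       ((∃ t ∈ out, pvPos n.toNat t = p) ∨ (∃ zt ∈ R, pvPos n.toNat zt.2 = p)) →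
       ∃ t ∈ (R.foldl (fun s zt => pvVisit zt.1 s zt.2) (dc, out)).2,
         pvPos n.toNat t = p)) := by
  intro R
  induction R with
  | nil =>
      intro dc out hR hdcl hdcc houts
      refine ⟨hdcl, fun p hp => hdcc p hp, ?_, ?_⟩
      · intro t ht
        exact ⟨(houts t ht).1, (houts t ht).2, Or.inl ht⟩
      · rintro p hp hpd (⟨t, ht, hte⟩ | ⟨zt, hzt, _⟩)
        · exact ⟨t, ht, hte⟩
        · simp at hzt
  | cons zt R ih =>
      intro dc out hR hdcl hdcc houts
      obtain ⟨hz, ht, hzk⟩ := hR zt List.mem_cons_self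
      have hn0 : 0 < n := pvInR_pos hz |>.1
      have hz' : pvInR (dc.length : Int) zt.1 := by rw [hdcl]; exact (pvInR_pos hz).2
      have ht' : pvInR (dc.length : Int) zt.2 := by rw [hdcl]; exact (pvInR_pos ht).2
      have hpos1 : pvPos dc.length zt.1 = pvPos n.toNat zt.1 := by rw [hdcl]
      have hpos2 : pvPos dc.length zt.2 = pvPos n.toNat zt.2 := by rw [hdcl]
      have hp1lt : pvPos n.toNat zt.1 < n.toNat := by
        have := pvPos_lt dc.length zt.1 hz'
        rwa [hpos1, hdcl] at this
      have hp2lt : pvPos n.toNat zt.2 < n.toNat := by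
        have := pvPos_lt dc.length zt.2 ht'
        rwa [hpos2, hdcl] at this
      have hget : PySem.List.pyGet? dc zt.2 = some (dc.getD (pvPos n.toNat zt.2) 0) := by
        rw [pvGet?_eq dc zt.2 0 ht', hpos2]
      have hread1 : PySem.List.pyGetD dc zt.1 (-1) = (k : Int) := by
        rw [PySem.List.pyGetD, pvGet?_eq dc zt.1 0 hz', hpos1, Option.getD_some]
        rw [hdcc _ hp1lt, if_pos (by rw [hzk]; omega)]
        exact hzk
      simp only [List.foldl_cons]
      by_cases hw : dc.getD (pvPos n.toNat zt.2) 0 = -1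
      · -- the visit writes k+1 at pos zt.2 and appends zt.2
        have hvis : pvVisit zt.1 (dc, out) zt.2
            = (dc.set (pvPos n.toNat zt.2) ((k : Int) + 1), out ++ [zt.2]) := by
          unfold pvVisit
          rw [hget]
          simp only [hw, if_pos rfl, hread1, if_true]
          rw [pvSetD_eq dc zt.2 _ ht', hpos2]
        have hd0 : dist0.getD (pvPos n.toNat zt.2) 0 = -1 := by
          by_contra hd0
          rw [hdcc _ hp2lt, if_pos hd0] at hw
          exact hd0 hw
        simp only [hvis]
        have hres := ih (dc.set (pvPos n.toNat zt.2) ((k : Int) + 1)) (out ++ [zt.2])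
          (fun w hwmem => hR w (List.mem_cons_of_mem _ hwmem))
          (by simpa using hdcl)
          (by
            intro p hp
            by_cases hpe : p = pvPos n.toNat zt.2
            · subst hpe
              rw [pvGetD_set, if_pos ⟨rfl, by omega⟩]
              rw [if_neg (fun h => h hd0), if_pos ⟨zt.2, by simp⟩]
            · rw [pvGetD_set, if_neg (fun hc => hpe hc.1.symm), hdcc p hp]
              by_cases hd1 : dist0.getD p 0 = -1
              · rw [if_neg (fun h => h hd1)]
                conv_rhs => rw [if_neg (fun h => h hd1)]
                refine if_congr ?_ rfl rfl
                constructor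
                · rintro ⟨t, htm, hte⟩; exact ⟨t, by simp [htm], hte⟩
                · rintro ⟨t, htm, hte⟩
                  rcases List.mem_append.mp htm with h | h
                  · exact ⟨t, h, hte⟩
                  · simp at h; subst h; exact absurd hte.symm hpe
              · rw [if_pos hd1, if_pos hd1])
          (by
            intro t htm
            rcases List.mem_append.mp htm with h | h
            · exact houts t h
            · simp at h; subst h; exact ⟨ht, hd0⟩)
        obtain ⟨L1, L2, L3, L4⟩ := hres
        refine ⟨L1, L2, ?_, ?_⟩
        · intro t htm
          obtain ⟨a1, a2, a3⟩ := L3 t htm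
          refine ⟨a1, a2, ?_⟩
          rcases a3 with h | ⟨z, hzm⟩
          · rcases List.mem_append.mp h with h | h
            · exact Or.inl h
            · simp at h; subst h
              exact Or.inr ⟨zt.1, by simp⟩
          · exact Or.inr ⟨z, List.mem_cons_of_mem _ hzm⟩
        · rintro p hp hpd (⟨t, htm, hte⟩ | ⟨w, hwm, hwe⟩)
          · exact L4 p hp hpd (Or.inl ⟨t, by simp [htm], hte⟩)
          · rcases List.mem_cons.mp hwm with h | h
            · exact L4 p hp hpd (Or.inl ⟨zt.2, by simp, by rw [← h]; exact hwe⟩)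
            · exact L4 p hp hpd (Or.inr ⟨w, h, hwe⟩)
      · -- already discovered: the visit is a no-op
        have hvis : pvVisit zt.1 (dc, out) zt.2 = (dc, out) := by
          unfold pvVisit
          rw [hget]
          simp only [hw, if_false]
        simp only [hvis]
        have hres := ih dc out
          (fun w hwmem => hR w (List.mem_cons_of_mem _ hwmem)) hdcl hdcc houts
        obtain ⟨L1, L2, L3, L4⟩ := hres
        refine ⟨L1, L2, ?_, ?_⟩
        · intro t htm
          obtain ⟨a1, a2, a3⟩ := L3 t htm
          refine ⟨a1, a2, ?_⟩
          rcases a3 with h | ⟨z, hzm⟩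
          · exact Or.inl h
          · exact Or.inr ⟨z, List.mem_cons_of_mem _ hzm⟩
        · rintro p hp hpd (⟨t, htm, hte⟩ | ⟨w, hwm, hwe⟩)
          · exact L4 p hp hpd (Or.inl ⟨t, htm, hte⟩)
          · rcases List.mem_cons.mp hwm with h | h
            · -- the head pair's target was already covered: read it off the dc character
              have hwe' : pvPos n.toNat zt.2 = p := by rw [h] at hwe; exact hwe
              have hchar := hdcc p hp
              rw [if_neg (fun hh => hh hpd)] at hchar
              have hcov : ∃ t ∈ out, pvPos n.toNat t = p := by
                by_contra hno
                rw [if_neg hno] at hchar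
                rw [hwe'] at hw
                exact hw hchar
              exact L4 p hp hpd (Or.inl hcov)
            · exact L4 p hp hpd (Or.inr ⟨w, h, hwe⟩)

-- what one level of BFS writes is exactly one DP round
lemma pvLevel_eq_step (n : Int) (adj : List (List Int)) (k : Nat) (dist front : List Int)
    (hadj : pvAdjOK n adj) (hfr : front ≠ []) (hinv : pvInv n adj k dist front) :
    (pvLevel adj dist front).1 = pvStepDP n adj dist (k : Int) ∧
    pvInv n adj (k + 1) (pvLevel adj dist front).1 (pvLevel adj dist front).2 := by
  obtain ⟨hal, hlab, hsym⟩ := hadj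
  obtain ⟨hlen, hH1, hH2a, hH2b, hH3, hH4⟩ := hinv
  have hn0 : 0 < n := by
    cases front with
    | nil => exact absurd rfl hfr
    | cons z r => exact (pvInR_pos (hH2a z List.mem_cons_self).1).1
  have hflat : pvLevel adj dist front
      = (front.flatMap (fun z => (PySem.List.pyGetD adj z []).map (fun t => (z, t)))).foldl
          (fun s zt => pvVisit zt.1 s zt.2) (dist, []) :=
    pvFoldl_nest_eq_pairs (fun z => PySem.List.pyGetD adj z []) pvVisit front (dist, [])
  set P := front.flatMap (fun z => (PySem.List.pyGetD adj z []).map (fun t => (z, t))) with hP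
  have hadjget : ∀ z, pvInR n z →
      PySem.List.pyGetD adj z [] = adj.getD (pvPos n.toNat z) [] := by
    intro z hzr
    rw [pvGetD_eq adj z [] [] (by rw [hal]; exact (pvInR_pos hzr).2), hal]
  have hPmem : ∀ zt ∈ P, zt.1 ∈ front ∧ zt.2 ∈ adj.getD (pvPos n.toNat zt.1) [] := by
    intro zt hzt
    rw [hP] at hzt
    obtain ⟨z, hzf, hzt2⟩ := List.mem_flatMap.mp hzt
    obtain ⟨t, htm, hte⟩ := List.mem_map.mp hzt2
    obtain ⟨hzr, _⟩ := hH2a z hzf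
    rw [← hte]
    exact ⟨hzf, by rw [← hadjget z hzr]; exact htm⟩
  have hPmem' : ∀ z t, z ∈ front → t ∈ adj.getD (pvPos n.toNat z) [] → (z, t) ∈ P := by
    intro z t hzf htm
    rw [hP]
    refine List.mem_flatMap.mpr ⟨z, hzf, List.mem_map.mpr ⟨t, ?_, rfl⟩⟩
    rw [hadjget z (hH2a z hzf).1]; exact htm
  have hlabmem : ∀ (p : Nat), p < n.toNat → ∀ q ∈ adj.getD p [], pvInR n q := by
    intro p hp q hq
    have hpl : p < adj.length := by omega
    have : adj.getD p [] ∈ adj := by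
      rw [List.getD_eq_getElem _ _ hpl]; exact List.getElem_mem hpl
    exact hlab _ this q hq
  have hR : ∀ zt ∈ P,
      pvInR n zt.1 ∧ pvInR n zt.2 ∧ dist.getD (pvPos n.toNat zt.1) 0 = (k : Int) := by
    intro zt hzt
    obtain ⟨hzf, htm⟩ := hPmem zt hzt
    obtain ⟨hzr, hzv⟩ := hH2a zt.1 hzf
    exact ⟨hzr, hlabmem _ (pvPos_lt n.toNat zt.1 (pvInR_pos hzr).2) zt.2 htm, hzv⟩
  obtain ⟨L1, L2, L3, L4⟩ := pvPairs_fold n k dist hlen P dist []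
    hR hlen
    (by
      intro p hp
      by_cases hd : dist.getD p 0 = -1
      · rw [if_neg (fun hh => hh hd), if_neg (by rintro ⟨t, ht, _⟩; simp at ht), hd]
      · rw [if_pos hd])
    (by intro t ht; simp at ht)
  have hTouch : ∀ p, p < n.toNat → dist.getD p 0 = -1 →
      ((∃ t ∈ (P.foldl (fun s zt => pvVisit zt.1 s zt.2) (dist, [])).2,
          pvPos n.toNat t = p) ↔
        ∃ q ∈ adj.getD p [], dist.getD (pvPos n.toNat q) 0 ≠ -1) := by
    intro p hp hpd
    constructor
    · rintro ⟨t, htm, hte⟩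
      obtain ⟨htr, _, hsrc⟩ := L3 t htm
      rcases hsrc with h | ⟨z, hzP⟩
      · simp at h
      · obtain ⟨hzf, htadj⟩ := hPmem (z, t) hzP
        obtain ⟨hzr, hzv⟩ := hH2a z hzf
        have hzlt := pvPos_lt n.toNat z (pvInR_pos hzr).2
        obtain ⟨q, hq, hqe⟩ := (hsym (pvPos n.toNat z) p hzlt hp).mp ⟨t, htadj, hte⟩
        exact ⟨q, hq, by rw [hqe, hzv]; omega⟩
    · rintro ⟨q, hq, hqv⟩
      have hqr := hlabmem p hp q hq
      have hqlt := pvPos_lt n.toNat q (pvInR_pos hqr).2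
      have hqk : dist.getD (pvPos n.toNat q) 0 = (k : Int) := by
        rcases hH3 p hp hpd q hq with h | h
        · exact absurd h hqv
        · exact h
      obtain ⟨z, hzf, hze⟩ := hH2b (pvPos n.toNat q) hqlt hqk
      obtain ⟨t, htm, hte⟩ := (hsym p (pvPos n.toNat z) hp
        (pvPos_lt n.toNat z (pvInR_pos (hH2a z hzf).1).2)).mp ⟨q, hq, by rw [hze]⟩
      exact L4 p hp hpd (Or.inr ⟨(z, t), hPmem' z t hzf htm, hte⟩)
  have hstepEntry : ∀ (p : Nat), p < n.toNat →
      (pvStepDP n adj dist (k : Int)).getD p 0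
        = (if dist.getD p 0 ≠ -1 then dist.getD p 0
           else if (adj.getD p []).any (fun q => dist.getD (pvPos n.toNat q) 0 != -1)
           then (k : Int) + 1 else -1) := by
    intro p hp
    unfold pvStepDP
    rw [List.getD_eq_getElem _ _ (by
      rw [List.length_map, PySem.List.length_pyRange_one]; simpa using hp)]
    rw [List.getElem_map, PySem.List.getElem_pyRange_one, zero_add]
    have hgd : PySem.List.pyGetD dist ((p : Nat) : Int) (-1) = dist.getD p 0 := by
      rw [pvGetD_eq dist _ (-1) 0 (by unfold pvInR; omega)]
      simp [pvPos]
    have hga : PySem.List.pyGetD adj ((p : Nat) : Int) [] = adj.getD p [] := by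
      rw [pvGetD_eq adj _ [] [] (by unfold pvInR; omega)]
      simp [pvPos]
    rw [hgd, hga]
    have hany : (adj.getD p []).any (fun q => PySem.List.pyGetD dist q (-1) != -1)
        = (adj.getD p []).any (fun q => dist.getD (pvPos n.toNat q) 0 != -1) := by
      apply PySem.List.any_congr_mem
      intro q hq
      have hqr := hlabmem p hp q hq
      congr 1
      rw [pvGetD_eq dist q (-1) 0 (by rw [hlen]; exact (pvInR_pos hqr).2), hlen]
    rw [hany]
  refine ⟨?_, ?_⟩
  · rw [hflat]
    apply List.ext_getElem (by rw [L1, pvStepDP_length])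
    intro p h1 h2
    have hp : p < n.toNat := by rwa [L1] at h1
    rw [← List.getD_eq_getElem _ 0 h1, ← List.getD_eq_getElem _ 0 h2]
    rw [L2 p hp, hstepEntry p hp]
    by_cases hd : dist.getD p 0 = -1
    · rw [if_neg (fun hh => hh hd)]
      conv_rhs => rw [if_neg (fun hh => hh hd)]
      refine if_congr ?_ rfl rfl
      rw [hTouch p hp hd]
      simp [List.any_eq_true, bne_iff_ne]
    · rw [if_pos hd, if_pos hd]
  · rw [hflat]
    unfold pvInv
    refine ⟨L1, ?_, ?_, ?_, ?_, ?_⟩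
    · intro p hp
      rw [L2 p hp]
      by_cases hd : dist.getD p 0 = -1
      · rw [if_neg (fun hh => hh hd)]
        by_cases hex : ∃ t ∈ (P.foldl (fun s zt => pvVisit zt.1 s zt.2) (dist, [])).2,
            pvPos n.toNat t = p
        · rw [if_pos hex]; right; constructor <;> [omega; (push_cast; omega)]
        · rw [if_neg hex]; left; rfl
      · rw [if_pos hd]
        rcases hH1 p hp with h | h
        · exact absurd h hd
        · right; exact ⟨h.1, by push_cast; omega⟩
    · intro t htm
      obtain ⟨htr, htd, _⟩ := L3 t htm
      have hplt := pvPos_lt n.toNat t (pvInR_pos htr).2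
      refine ⟨htr, ?_⟩
      rw [L2 _ hplt, if_neg (fun hh => hh htd), if_pos ⟨t, htm, rfl⟩]
      push_cast; ring
    · intro p hp hpe
      rw [L2 p hp] at hpe
      by_cases hd : dist.getD p 0 = -1
      · rw [if_neg (fun hh => hh hd)] at hpe
        by_cases hex : ∃ t ∈ (P.foldl (fun s zt => pvVisit zt.1 s zt.2) (dist, [])).2,
            pvPos n.toNat t = p
        · exact hex
        · rw [if_neg hex] at hpe; exfalso; push_cast at hpe; omega
      · rw [if_pos hd] at hpe
        rcases hH1 p hp with h | h
        · exact absurd h hd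
        · exfalso
          have := h.2
          rw [hpe] at this
          push_cast at this
          omega
    · intro p hp hpd q hq
      rw [L2 p hp] at hpd
      have hd : dist.getD p 0 = -1 := by
        by_contra hc
        rw [if_pos hc] at hpd
        exact hc hpd
      rw [if_neg (fun hh => hh hd)] at hpd
      have hnex : ¬ ∃ t ∈ (P.foldl (fun s zt => pvVisit zt.1 s zt.2) (dist, [])).2,
          pvPos n.toNat t = p := by
        intro hex
        rw [if_pos hex] at hpd
        omega
      have hqr := hlabmem p hp q hq
      have hqlt := pvPos_lt n.toNat q (pvInR_pos hqr).2
      rw [L2 _ hqlt]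
      by_cases hdq : dist.getD (pvPos n.toNat q) 0 = -1
      · rw [if_neg (fun hh => hh hdq)]
        by_cases hex : ∃ t ∈ (P.foldl (fun s zt => pvVisit zt.1 s zt.2) (dist, [])).2,
            pvPos n.toNat t = pvPos n.toNat q
        · rw [if_pos hex]; right; push_cast; ring
        · rw [if_neg hex]; left; rfl
      · exfalso
        have hk : dist.getD (pvPos n.toNat q) 0 = (k : Int) := by
          rcases hH3 p hp hd q hq with h | h
          · exact absurd h hdq
          · exact h
        obtain ⟨z, hzf, hze⟩ := hH2b _ hqlt hk
        obtain ⟨t, htm, hte⟩ := (hsym p (pvPos n.toNat z) hp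
          (pvPos_lt n.toNat z (pvInR_pos (hH2a z hzf).1).2)).mp ⟨q, hq, by rw [hze]⟩
        exact hnex (L4 p hp hd (Or.inr ⟨(z, t), hPmem' z t hzf htm, hte⟩))
    · intro hne j hj
      by_cases hjk : j ≤ k
      · obtain ⟨p, hp, hpv⟩ := hH4 hfr j hjk
        refine ⟨p, hp, ?_⟩
        rw [L2 p hp, if_pos (by rw [hpv]; omega)]
        exact hpv
      · have hj1 : j = k + 1 := by omega
        subst hj1
        cases hF2 : (P.foldl (fun s zt => pvVisit zt.1 s zt.2) (dist, [])).2 with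
        | nil => rw [hF2] at hne; exact absurd rfl hne
        | cons t r =>
            have htm : t ∈ (P.foldl (fun s zt => pvVisit zt.1 s zt.2) (dist, [])).2 := by
              rw [hF2]; exact List.mem_cons_self
            obtain ⟨htr, htd, _⟩ := L3 t htm
            have hplt := pvPos_lt n.toNat t (pvInR_pos htr).2
            refine ⟨pvPos n.toNat t, hplt, ?_⟩
            rw [L2 _ hplt, if_neg (fun hh => hh htd), if_pos ⟨t, htm, rfl⟩]
            push_cast; ring

-- a stabilised distance array is a fixed point of every DP round
lemma pvStep_stable (n : Int) (adj : List (List Int)) (dist : List Int) (k : Int)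
    (hlen : dist.length = n.toNat)
    (hstab : ∀ p, p < n.toNat → dist.getD p 0 = -1 →
      ∀ q ∈ adj.getD p [], pvInR n q → dist.getD (pvPos n.toNat q) 0 = -1)
    (hadj : pvAdjOK n adj) :
    pvStepDP n adj dist k = dist := by
  obtain ⟨hal, hlab, _⟩ := hadj
  apply List.ext_getElem (by rw [pvStepDP_length, hlen])
  intro i h1 h2
  have hi : i < n.toNat := by rwa [pvStepDP_length] at h1
  have hn0 : 0 ≤ n := by omega
  unfold pvStepDP
  rw [List.getElem_map, PySem.List.getElem_pyRange_one]
  have hcast : ((0 : Int) + (i : Int)) = ((i : Int)) := by ring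
  rw [hcast, PySem.List.pyGetD_natCast]
  have hgd : dist.getD i (-1) = dist[i] := List.getD_eq_getElem _ _ (by omega)
  have hgd0 : dist.getD i 0 = dist[i] := List.getD_eq_getElem _ _ (by omega)
  rw [hgd]
  by_cases hd : dist[i] = -1
  · rw [if_neg (by simpa using hd)]
    have hadjg : PySem.List.pyGetD adj (i : Int) [] = adj.getD i [] :=
      PySem.List.pyGetD_natCast adj i []
    have hany : (PySem.List.pyGetD adj (i : Int) []).any
        (fun q => PySem.List.pyGetD dist q (-1) != -1) = false := by
      rw [hadjg]
      apply List.any_eq_false.mpr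
      intro q hq
      have hqr : pvInR n q := by
        have hilt : i < adj.length := by omega
        have : adj.getD i [] ∈ adj := by
          rw [List.getD_eq_getElem _ _ hilt]; exact List.getElem_mem hilt
        exact hlab _ this q hq
      have : PySem.List.pyGetD dist q (-1) = dist.getD (pvPos n.toNat q) 0 := by
        rw [pvGetD_eq dist q (-1) 0 (by unfold pvInR at hqr ⊢; omega), hlen]
      rw [this, hstab i hi (by omega) q hq hqr]
      simp
    rw [hany]
    simp [hd]
  · rw [if_pos (by simpa using hd)]

lemma pvFold_stable (n : Int) (adj : List (List Int)) (dist : List Int)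
    (hstep : ∀ k : Int, pvStepDP n adj dist k = dist) :
    ∀ l : List Int, l.foldl (pvStepDP n adj) dist = dist := by
  intro l
  induction l with
  | nil => rfl
  | cons a l ih => simpa [hstep a] using ih

-- a nonempty frontier at level k forces k < n (the values 0..k occur at distinct indices)
lemma pvK_lt (n' k : Nat) (dist : List Int) (hlen : dist.length = n')
    (hvals : ∀ j : Nat, j ≤ k → ∃ p, p < n' ∧ dist.getD p 0 = (j : Int)) : k < n' := by
  have hinj : Function.Injective (fun j : Fin (k + 1) =>
      (⟨(hvals j.1 (by omega)).choose, (hvals j.1 (by omega)).choose_spec.1⟩ : Fin n')) := by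
    intro j1 j2 he
    have h1 := (hvals j1.1 (by omega)).choose_spec.2
    have h2 := (hvals j2.1 (by omega)).choose_spec.2
    have : (hvals j1.1 (by omega)).choose = (hvals j2.1 (by omega)).choose :=
      congrArg Fin.val he
    rw [this, h2] at h1
    exact Fin.ext (by exact_mod_cast h1.symm)
  have := Fintype.card_le_of_injective _ hinj
  simpa using this

-- main bridge: from an invariant state, the rest of the BFS equals the rest of the DP rounds
lemma pvMain (n : Int) (adj : List (List Int)) (hadj : pvAdjOK n adj) :
    ∀ (fuel : Nat) (k : Nat) (dist front : List Int) (h : pvOkDist dist),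
    n.toNat ≤ k + fuel → pvInv n adj k dist front →
    pvBfsB adj dist front h
      = (PySem.List.pyRange (k : Int) n 1).foldl (pvStepDP n adj) dist := by
  intro fuel
  induction fuel with
  | zero =>
      intro k dist front h hle hinv
      obtain ⟨hlen, hH1, hH2a, hH2b, hH3, hH4⟩ := hinv
      cases front with
      | cons z rest =>
          have hk := pvK_lt n.toNat k dist hlen (hH4 (by simp))
          omega
      | nil =>
          rw [pvBfsB]
          refine (pvFold_stable n adj dist ?_ _).symm
          intro k'
          refine pvStep_stable n adj dist k' hlen ?_ hadj
          intro p hp hpd q hq hqr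
          rcases hH3 p hp hpd q hq with hc | hc
          · exact hc
          · obtain ⟨z, hz, _⟩ := hH2b (pvPos n.toNat q)
              (by rw [← hlen]; exact pvPos_lt _ _ (by unfold pvInR at hqr ⊢; omega)) hc
            simp at hz
  | succ fuel ih =>
      intro k dist front h hle hinv
      obtain ⟨hlen, hH1, hH2a, hH2b, hH3, hH4⟩ := hinv
      cases front with
      | nil =>
          rw [pvBfsB]
          refine (pvFold_stable n adj dist ?_ _).symm
          intro k'
          refine pvStep_stable n adj dist k' hlen ?_ hadj
          intro p hp hpd q hq hqr
          rcases hH3 p hp hpd q hq with hc | hc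
          · exact hc
          · obtain ⟨z, hz, _⟩ := hH2b (pvPos n.toNat q)
              (by rw [← hlen]; exact pvPos_lt _ _ (by unfold pvInR at hqr ⊢; omega)) hc
            simp at hz
      | cons z rest =>
          have hk := pvK_lt n.toNat k dist hlen (hH4 (by simp))
          have hn0 : 0 < n := by omega
          obtain ⟨hstep, hinv'⟩ := pvLevel_eq_step n adj k dist (z :: rest) hadj
            (by simp) ⟨hlen, hH1, hH2a, hH2b, hH3, hH4⟩
          rw [pvBfsB, ih (k + 1) _ _ _ (by omega) hinv', hstep,
            show ((k + 1 : Nat) : Int) = (k : Int) + 1 by push_cast; ring]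
          conv_rhs => rw [PySem.List.pyRange_one_cons (show (k : Int) < n by omega)]
          rw [List.foldl_cons]

lemma pvInit_getD (n : Int) (s : Int) (hs : 0 ≤ s ∧ s < n) (p : Nat) :
    (PySem.List.pySetD (List.replicate n.toNat (-1)) s 0).getD p 0
      = if p = s.toNat ∧ p < n.toNat then 0 else if p < n.toNat then -1 else 0 := by
  have hsr : pvInR ((List.replicate n.toNat (-1 : Int)).length : Int) s := by
    unfold pvInR; simp; omega
  rw [pvSetD_eq _ s 0 hsr]
  have hpos : pvPos (List.replicate n.toNat (-1 : Int)).length s = s.toNat := by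
    unfold pvPos; rw [if_pos hs.1]
  rw [hpos]
  by_cases hp : p < n.toNat
  · rw [List.getD_eq_getElem _ _ (by simpa using hp)]
    by_cases he : p = s.toNat
    · subst he
      rw [List.getElem_set_self (by simpa using hp)]
      simp [hp]
    · rw [List.getElem_set_ne (by omega), List.getElem_replicate]
      simp [he, hp]
  · rw [List.getD_eq_default _ _ (by simpa using hp)]
    simp [hp]

lemma pvDist_eq (n : Int) (adj : List (List Int)) (s : Int)
    (hadj : pvAdjOK n adj) (hs : 0 ≤ s ∧ s < n) :
    pvGetDistancesA n adj s = pvDistDP n adj s := by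
  have hn : 0 < n := by omega
  have hlen : (PySem.List.pySetD (List.replicate n.toNat (-1 : Int)) s 0).length = n.toNat := by
    simp [PySem.List.length_pySetD]
  have hsr : pvInR n s := by unfold pvInR; omega
  have hposs : pvPos n.toNat s = s.toNat := by unfold pvPos; rw [if_pos hs.1]
  have hstlt : s.toNat < n.toNat := by omega
  have hinv : pvInv n adj 0 (PySem.List.pySetD (List.replicate n.toNat (-1)) s 0) [s] := by
    refine ⟨hlen, ?_, ?_, ?_, ?_, ?_⟩
    · intro p hp
      rw [pvInit_getD n s hs p]
      by_cases he : p = s.toNat ∧ p < n.toNat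
      · rw [if_pos he]; right; omega
      · rw [if_neg he, if_pos hp]; left; rfl
    · intro z hz
      simp only [List.mem_singleton] at hz
      rw [hz]
      refine ⟨hsr, ?_⟩
      rw [hposs, pvInit_getD n s hs s.toNat, if_pos ⟨rfl, hstlt⟩]
      simp
    · intro p hp hpe
      refine ⟨s, List.mem_singleton.mpr rfl, ?_⟩
      rw [pvInit_getD n s hs p] at hpe
      by_cases he : p = s.toNat ∧ p < n.toNat
      · rw [hposs]; exact he.1.symm
      · rw [if_neg he, if_pos hp] at hpe; omega
    · intro p hp hpd q hq
      rw [pvInit_getD n s hs (pvPos n.toNat q)]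
      by_cases he : pvPos n.toNat q = s.toNat ∧ pvPos n.toNat q < n.toNat
      · rw [if_pos he]; right; simp
      · rw [if_neg he]
        by_cases hlt : pvPos n.toNat q < n.toNat
        · rw [if_pos hlt]; left; rfl
        · rw [if_neg hlt]; right; simp
    · intro _ j hj
      refine ⟨s.toNat, hstlt, ?_⟩
      rw [pvInit_getD n s hs s.toNat, if_pos ⟨rfl, hstlt⟩]
      omega
  unfold pvGetDistancesA pvDistDP
  rw [pvBfsA_eq_pvBfsB (pvCountNeg (PySem.List.pySetD (List.replicate n.toNat (-1)) s 0) + 1)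
    adj _ _ (by simp) _ (pvOkDist_init n.toNat s)]
  have := pvMain n adj hadj n.toNat 0 _ [s] (pvOkDist_init n.toNat s) (by omega) hinv
  simpa using this

-- ---- the adjacency built from paths satisfies the context, and both builds agree ----
lemma pvAdj_eq (n : Int) (paths : List (Int × Int)) :
    paths.foldl (fun g p => pvAddEdge false g p.1 p.2) (List.replicate n.toNat [])
      = paths.foldl (fun g p => pvAppendAt (pvAppendAt g p.1 p.2) p.2 p.1)
          (List.replicate n.toNat []) := by
  have hf : (fun (g : List (List Int)) (p : Int × Int) => pvAddEdge false g p.1 p.2)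
      = fun g p => pvAppendAt (pvAppendAt g p.1 p.2) p.2 p.1 := by
    funext g p
    simp [pvAddEdge]
  rw [hf]

lemma pvAppendAt_spec (n : Int) (g : List (List Int)) (i v : Int) (hn : 0 ≤ n)
    (hlen : g.length = n.toNat) (hi : pvInR n i) :
    (pvAppendAt g i v).length = g.length ∧
    ∀ p : Nat, (pvAppendAt g i v).getD p []
      = if p = pvPos n.toNat i then g.getD p [] ++ [v] else g.getD p [] := by
  have hi' : pvInR (g.length : Int) i := by
    unfold pvInR at hi ⊢; omega
  have hpos : pvPos g.length i < g.length := pvPos_lt _ _ hi'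
  have hposeq : pvPos g.length i = pvPos n.toNat i := by rw [hlen]
  unfold pvAppendAt
  rw [pvSetD_eq g i _ hi', pvGetD_eq g i [] [] hi']
  refine ⟨by simp, fun p => ?_⟩
  by_cases hp : p = pvPos n.toNat i
  · subst hp
    rw [if_pos rfl, ← hposeq, List.getD_eq_getElem _ _ (by simpa using hpos),
      List.getElem_set_self, List.getD_eq_getElem _ _ hpos]
  · rw [if_neg hp]
    by_cases hplen : p < g.length
    · rw [List.getD_eq_getElem _ _ (by simpa using hplen),
        List.getElem_set_ne (by omega), List.getD_eq_getElem _ _ hplen]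
    · rw [List.getD_eq_default _ _ (by simpa using hplen),
        List.getD_eq_default _ _ (by omega)]

lemma pvAdjOK_build (n : Int) (paths : List (Int × Int))
    (hn : 0 ≤ n)
    (hp : ∀ p ∈ paths, pvInR n p.1 ∧ pvInR n p.2) :
    pvAdjOK n (paths.foldl (fun g p => pvAppendAt (pvAppendAt g p.1 p.2) p.2 p.1)
      (List.replicate n.toNat [])) := by
  have key : ∀ (ps : List (Int × Int)) (g : List (List Int)),
      (∀ p ∈ ps, pvInR n p.1 ∧ pvInR n p.2) → pvAdjOK n g →
      pvAdjOK n (ps.foldl (fun g p => pvAppendAt (pvAppendAt g p.1 p.2) p.2 p.1) g) := by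
    intro ps
    induction ps with
    | nil => intro g _ hg; simpa using hg
    | cons ab ps ih =>
        intro g hmem hg
        obtain ⟨hlen, hlab, hsym⟩ := hg
        obtain ⟨ha, hb⟩ := hmem ab List.mem_cons_self
        obtain ⟨hl1, hg1⟩ := pvAppendAt_spec n g ab.1 ab.2 hn hlen ha
        obtain ⟨hl2, hg2⟩ := pvAppendAt_spec n (pvAppendAt g ab.1 ab.2) ab.2 ab.1 hn
          (by rw [hl1, hlen]) hb
        set g2 := pvAppendAt (pvAppendAt g ab.1 ab.2) ab.2 ab.1 with hg2def
        have hgl : g2.length = n.toNat := by rw [hl2, hl1, hlen]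
        have hchar : ∀ p : Nat, g2.getD p []
            = (if p = pvPos n.toNat ab.1 then g.getD p [] ++ [ab.2] else g.getD p [])
              ++ (if p = pvPos n.toNat ab.2 then [ab.1] else []) := by
          intro p
          rw [hg2 p, hg1 p]
          by_cases h2 : p = pvPos n.toNat ab.2 <;> simp [h2]
        have hmem2 : ∀ (p : Nat) (t : Int), t ∈ g2.getD p [] ↔
            t ∈ g.getD p [] ∨ (p = pvPos n.toNat ab.1 ∧ t = ab.2)
              ∨ (p = pvPos n.toNat ab.2 ∧ t = ab.1) := by
          intro p t
          rw [hchar p]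
          by_cases h1 : p = pvPos n.toNat ab.1 <;> by_cases h2 : p = pvPos n.toNat ab.2
          · rw [if_pos h1, if_pos h2]
            simp only [List.mem_append, List.mem_singleton]
            tauto
          · rw [if_pos h1, if_neg h2]
            simp only [List.mem_append, List.mem_singleton, List.not_mem_nil, or_false]
            tauto
          · rw [if_neg h1, if_pos h2]
            simp only [List.mem_append, List.mem_singleton]
            tauto
          · rw [if_neg h1, if_neg h2]
            simp only [List.mem_append, List.not_mem_nil, or_false]
            tauto
        refine ih _ (fun p hp' => hmem p (List.mem_cons_of_mem _ hp')) ⟨hgl, ?_, ?_⟩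
        · intro l hl q hq
          have : ∃ p : Nat, p < g2.length ∧ g2.getD p [] = l := by
            obtain ⟨p, hp', hpe⟩ := List.mem_iff_getElem.mp hl
            exact ⟨p, hp', by rw [List.getD_eq_getElem _ _ hp', hpe]⟩
          obtain ⟨p, hplt, hpe⟩ := this
          rw [← hpe] at hq
          rcases (hmem2 p q).mp hq with h | ⟨_, h⟩ | ⟨_, h⟩
          · by_cases hpg : p < g.length
            · exact hlab _ (by
                rw [List.getD_eq_getElem _ _ hpg] at h ⊢
                exact List.getElem_mem hpg) q h
            · rw [List.getD_eq_default _ _ (by simpa using hpg)] at h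
              simp at h
          · exact h ▸ hb
          · exact h ▸ ha
        · intro p q hplt hqlt
          have hsym' := hsym p q hplt hqlt
          have hEx : ∀ (x y : Nat), (∃ t ∈ g2.getD x [], pvPos n.toNat t = y) ↔
              ((∃ t ∈ g.getD x [], pvPos n.toNat t = y)
                ∨ (x = pvPos n.toNat ab.1 ∧ y = pvPos n.toNat ab.2)
                ∨ (x = pvPos n.toNat ab.2 ∧ y = pvPos n.toNat ab.1)) := by
            intro x y
            constructor
            · rintro ⟨t, ht, rfl⟩
              rcases (hmem2 x t).mp ht with h | ⟨hx, rfl⟩ | ⟨hx, rfl⟩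
              · exact Or.inl ⟨t, h, rfl⟩
              · exact Or.inr (Or.inl ⟨hx, rfl⟩)
              · exact Or.inr (Or.inr ⟨hx, rfl⟩)
            · rintro (⟨t, ht, rfl⟩ | ⟨rfl, rfl⟩ | ⟨rfl, rfl⟩)
              · exact ⟨t, (hmem2 x t).mpr (Or.inl ht), rfl⟩
              · exact ⟨ab.2, (hmem2 _ ab.2).mpr (Or.inr (Or.inl ⟨rfl, rfl⟩)), rfl⟩
              · exact ⟨ab.1, (hmem2 _ ab.1).mpr (Or.inr (Or.inr ⟨rfl, rfl⟩)), rfl⟩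
          rw [hEx p q, hEx q p, hsym']
          constructor <;>
          · rintro (h | ⟨h1, h2⟩ | ⟨h1, h2⟩)
            · exact Or.inl h
            · exact Or.inr (Or.inr ⟨h2, h1⟩)
            · exact Or.inr (Or.inl ⟨h2, h1⟩)
  refine key paths (List.replicate n.toNat []) hp ⟨by simp, ?_, ?_⟩
  · intro l hl q hq
    rw [List.eq_of_mem_replicate hl] at hq
    simp at hq
  · intro p q hplt hqlt
    rw [List.getD_eq_getElem _ _ (by simpa using hplt),
      List.getD_eq_getElem _ _ (by simpa using hqlt)]
    simp

-- ---- lengths and the final count ----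
lemma pvDistDP_length (n : Int) (adj : List (List Int)) (s : Int) (hn : 0 < n) :
    (pvDistDP n adj s).length = n.toNat := by
  have key : ∀ (l : List Int) (init : List Int), init.length = n.toNat →
      (l.foldl (pvStepDP n adj) init).length = n.toNat := by
    intro l
    induction l with
    | nil => intro init h; simpa using h
    | cons a l ih => intro init h; simpa using ih _ (pvStepDP_length n adj init a)
  exact key _ _ (by simp [PySem.List.length_pySetD])

-- the index-loop count over range(n) is the count over the zipped distance arrays
lemma pvCount_eq (n d : Int) (d1 d2 : List Int) (hn : 0 ≤ n)
    (h1 : d1.length = n.toNat) (h2 : d2.length = n.toNat) :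
    (PySem.List.pyRange 0 n 1).foldl
      (fun cnt i =>
        if PySem.List.pyGetD d1 i (-1) ≤ d ∧ PySem.List.pyGetD d2 i (-1) ≤ d then cnt + 1
        else cnt) (0 : Int)
    = (d1.zip d2).foldl (fun cnt xy => if xy.1 ≤ d ∧ xy.2 ≤ d then cnt + 1 else cnt) (0 : Int) := by
  rw [PySem.List.foldl_ite_add_one
      (fun i => PySem.List.pyGetD d1 i (-1) ≤ d ∧ PySem.List.pyGetD d2 i (-1) ≤ d),
    PySem.List.foldl_ite_add_one (fun xy : Int × Int => xy.1 ≤ d ∧ xy.2 ≤ d)]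
  have hzip : (PySem.List.pyRange 0 n 1).map
      (fun i => (PySem.List.pyGetD d1 i (-1), PySem.List.pyGetD d2 i (-1))) = d1.zip d2 := by
    rw [← List.zip_map']
    have e1 : (PySem.List.pyRange 0 n 1).map (fun j => PySem.List.pyGetD d1 j (-1)) = d1 := by
      rw [show n = (d1.length : Int) by omega]
      exact PySem.List.map_pyGetD_pyRange_zero' d1 (-1)
    have e2 : (PySem.List.pyRange 0 n 1).map (fun j => PySem.List.pyGetD d2 j (-1)) = d2 := by
      rw [show n = (d2.length : Int) by omega]
      exact PySem.List.map_pyGetD_pyRange_zero' d2 (-1)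
    rw [e1, e2]
  rw [← hzip, List.countP_map]
  rfl

-- the argmax over range(n) is a value in [0, n)
lemma pvArgmaxAff_bounds (n : Int) (aff : List Bool) (dist : List Int) (hn : 0 < n) :
    0 ≤ pvArgmaxAff n aff dist ∧ pvArgmaxAff n aff dist < n := by
  unfold pvArgmaxAff
  cases hm : PySem.List.max? (PySem.List.pyRange 0 n 1)
      (fun i => if PySem.List.pyGetD aff i false then PySem.List.pyGetD dist i (-1) else -1) with
  | none =>
      have := (PySem.List.max?_eq_none_iff _ _).mp hm
      rw [PySem.List.pyRange_one_cons (by omega : (0:Int) < n)] at this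
      simp at this
  | some x =>
      have hx := PySem.List.max?_mem hm
      have := PySem.List.mem_pyRange_one.mp hx
      simpa using this

-- ===== VERDICT (by name: the statement is the Claim_ definition above) =====
theorem find_possible_book_locations_spec : Claim_equal_find_possible_book_locations := by
  intro n m d affected paths hdom hpre
  obtain ⟨hne, hh, haff, hpaths⟩ := hpre
  have hn : 0 < n := by
    cases affected with
    | nil => exact absurd rfl hne
    | cons a t =>
        have := haff a List.mem_cons_self
        simp only [List.headI] at hh
        omega
  have hadj : pvAdjOK n (paths.foldl (fun g p => pvAppendAt (pvAppendAt g p.1 p.2) p.2 p.1)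
      (List.replicate n.toNat [])) := pvAdjOK_build n paths (le_of_lt hn) (fun p hp => by
    obtain ⟨h1, h2⟩ := hpaths p hp; exact ⟨h1, h2⟩)
  have hsrc0 : 0 ≤ PySem.List.pyGetD affected 0 0 ∧ PySem.List.pyGetD affected 0 0 < n := by
    cases affected with
    | nil => exact absurd rfl hne
    | cons a t =>
        simp only [List.headI] at hh
        have := haff a List.mem_cons_self
        rw [PySem.List.pyGetD_zero_cons]
        exact ⟨hh, this.2⟩
  unfold Spec_find_possible_book_locations
  simp only [find_possible_book_locations, find_possible_book_locations_alt,
    pvGetAffectedDiameter, pvAdj_eq]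
  rw [pvDist_eq n _ _ hadj hsrc0]
  rw [pvDist_eq n _ _ hadj (pvArgmaxAff_bounds n _ _ hn)]
  rw [pvDist_eq n _ _ hadj (pvArgmaxAff_bounds n _ _ hn)]
  exact pvCount_eq n d _ _ (le_of_lt hn) (pvDistDP_length n _ _ hn) (pvDistDP_length n _ _ hn)
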